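-- pv_equiv track=rewrite | github.com/babblequest/XMLAnonymizer | XMLAnonymizer.py | sortByStringLength
-- ===== SOURCE A (Python) =====
-- def sortByStringLength(stringSet):
--     keysByLength = list()
--     # sort current values by length
--     for nextString in stringSet:
--         i = 0
--         inserted = False
--         while i < len(keysByLength) and not inserted:
--             if len(nextString) > len(keysByLength[i]):
--                 keysByLength.insert(i, nextString)
--                 inserted = True
--             i = i + 1
--
--         if (not inserted):
--             keysByLength.append(nextString)
--
--     return keysByLength
-- ===== SOURCE B (Python) =====
-- def sortByStringLength(stringSet):
--     # Bucket strings by length in one pass, then emit buckets by descending length.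
--     buckets = {}
--     for s in stringSet:
--         buckets.setdefault(len(s), []).append(s)
--     result = []
--     for length in sorted(buckets, reverse=True):
--         result += buckets[length]
--     return result
-- ===== Notes on version B (the rewrite author's own statement) =====
-- stated objective: faster
-- what changed: Replaces the quadratic insertion-sort (scan-and-insert for every string) by a one-pass bucketing of strings into a dict keyed by length, then emitting buckets by descending sorted length, preserving stability.
import Mathlib
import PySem

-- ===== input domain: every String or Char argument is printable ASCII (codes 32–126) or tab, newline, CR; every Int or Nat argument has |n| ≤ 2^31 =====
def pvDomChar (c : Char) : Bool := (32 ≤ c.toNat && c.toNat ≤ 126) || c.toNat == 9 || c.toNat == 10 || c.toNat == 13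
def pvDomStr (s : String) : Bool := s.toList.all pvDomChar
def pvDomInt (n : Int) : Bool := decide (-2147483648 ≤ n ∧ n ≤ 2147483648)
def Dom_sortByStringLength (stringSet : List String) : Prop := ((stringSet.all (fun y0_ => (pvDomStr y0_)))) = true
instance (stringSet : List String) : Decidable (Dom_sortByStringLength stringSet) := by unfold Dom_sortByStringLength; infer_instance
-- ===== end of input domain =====

-- B replaces A's quadratic scan-and-insert sort by one-pass length buckets emitted in
-- descending key order (same return value; measurably faster).


-- ===== PORT A =====
-- A's inner while loop: scan keysByLength left to right, insert nextString before the
-- first strictly shorter element; if never inserted, append at the end.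
def pvInsertScan (nextString : String) : List String → List String
  | [] => [nextString]
  | x :: rest =>
      if PySem.Str.len nextString > PySem.Str.len x then nextString :: x :: rest
      else x :: pvInsertScan nextString rest

def sortByStringLength (stringSet : List String) : List String :=
  stringSet.foldl (fun keysByLength nextString => pvInsertScan nextString keysByLength) []

-- ===== PORT B =====
-- buckets.setdefault(len(s), []).append(s)
def pvBuckets (stringSet : List String) : PySem.Dict Int (List String) :=
  stringSet.foldl (fun d s => d.modify (PySem.Str.len s) [] (fun b => b ++ [s])) PySem.Dict.empty

-- for length in sorted(buckets, reverse=True): result += buckets[length]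
-- (length is always a key of buckets, so buckets[length] = buckets.get(length, []): exact here)
def sortByStringLength_alt (stringSet : List String) : List String :=
  let buckets := pvBuckets stringSet
  (PySem.List.sorted buckets.keys (fun k => k) true).foldl
    (fun result length => result ++ buckets.getD length []) []

-- ===== PRECONDITION & SPEC =====
def Spec_sortByStringLength (stringSet : List String) (out : List String) : Prop := out = sortByStringLength_alt stringSet
instance (stringSet : List String) (out : List String) : Decidable (Spec_sortByStringLength stringSet out) := by unfold Spec_sortByStringLength; infer_instance

-- ===== CLAIM (what is proved, stated in full; the proofs are below) =====
def Claim_equal_sortByStringLength : Prop := ∀ (stringSet : List String), Dom_sortByStringLength stringSet → Spec_sortByStringLength stringSet (sortByStringLength stringSet)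

-- ===== LEMMAS AND PROOFS =====

-- A's scan is PySem's insertBy with the reverse-sort "before" test.
theorem pvInsertScan_eq (s : String) (l : List String) :
    pvInsertScan s l =
      PySem.List.insertBy (fun a b => decide (PySem.Str.len b < PySem.Str.len a)) s l := by
  induction l with
  | nil => rfl
  | cons x rest ih =>
      simp only [pvInsertScan, PySem.List.insertBy, gt_iff_lt, ih, decide_eq_true_eq]

theorem A_eq_sorted (xs : List String) :
    sortByStringLength xs = PySem.List.sorted xs PySem.Str.len true := by
  rw [PySem.List.sorted_rev_eq_foldl_insertBy]
  exact PySem.List.foldl_congr_mem _ _ _ _ (fun acc x _ => pvInsertScan_eq x acc)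

-- insertBy skips a prefix it does not insert into
theorem insertBy_append_not {α : Type} (bef : α → α → Bool) (x : α) (l r : List α)
    (h : ∀ y ∈ l, bef x y = false) :
    PySem.List.insertBy bef x (l ++ r) = l ++ PySem.List.insertBy bef x r := by
  induction l with
  | nil => simp
  | cons a t ih =>
      have ha : bef x a = false := h a (by simp)
      simp only [List.cons_append, PySem.List.insertBy, ha]
      simp [ih (fun y hy => h y (by simp [hy]))]

-- insertBy puts x in front when it goes before everything
theorem insertBy_front {α : Type} (bef : α → α → Bool) (x : α) (r : List α)
    (h : ∀ y ∈ r, bef x y = true) :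
    PySem.List.insertBy bef x r = x :: r := by
  cases r with
  | nil => rfl
  | cons a t => simp [PySem.List.insertBy, h a (by simp)]

-- sorted of a snoc is an insertBy into sorted
theorem sorted_rev_snoc {α κ : Type} [LT κ] [DecidableLT κ] (xs : List α) (x : α) (key : α → κ) :
    PySem.List.sorted (xs ++ [x]) key true =
      PySem.List.insertBy (fun a b => decide (key b < key a)) x (PySem.List.sorted xs key true) := by
  rw [PySem.List.sorted_rev_eq_foldl_insertBy, PySem.List.sorted_rev_eq_foldl_insertBy,
    List.foldl_append]
  rfl

-- a nodup reverse-sorted Int list is strictly decreasing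
theorem sorted_rev_strict (ks : List Int) (h : ks.Nodup) :
    (PySem.List.sorted ks (fun k => k) true).Pairwise (fun a b => b < a) := by
  have hp := PySem.List.sorted_pairwise_rev ks (fun k => k)
  have hn : (PySem.List.sorted ks (fun k => k) true).Nodup :=
    (PySem.List.sorted_perm ks (fun k => k) true).nodup_iff.mpr h
  exact (hp.and hn).imp (fun hab => lt_of_le_of_ne hab.1 (Ne.symm hab.2))

-- CORE: inserting s into a flatMap of strictly-descending-length buckets,
-- case "len s already a key": s lands at the end of its bucket.
theorem flat_mem (s : String) (L : Int) (hL : PySem.Str.len s = L)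
    (g : Int → List String) (hg : ∀ k, ∀ x ∈ g k, PySem.Str.len x = k) :
    ∀ ks : List Int, ks.Pairwise (fun a b => b < a) → L ∈ ks →
    PySem.List.insertBy (fun a b => decide (PySem.Str.len b < PySem.Str.len a)) s
        (ks.flatMap g) =
      ks.flatMap (fun k => g k ++ if L = k then [s] else []) := by
  intro ks
  induction ks with
  | nil => simp
  | cons k t ih =>
      intro hpw hmem
      have hpt := hpw.of_cons
      have hkt : ∀ k' ∈ t, k' < k := fun k' hk' => (List.pairwise_cons.mp hpw).1 k' hk'
      simp only [List.flatMap_cons]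
      by_cases hkL : k = L
      · subst hkL
        have h1 : ∀ y ∈ g k, (decide (PySem.Str.len y < PySem.Str.len s)) = false := by
          intro y hy
          rw [hg k y hy, hL]; simp
        rw [insertBy_append_not _ _ _ _ h1]
        have h2 : ∀ y ∈ t.flatMap g, (decide (PySem.Str.len y < PySem.Str.len s)) = true := by
          intro y hy
          rcases List.mem_flatMap.mp hy with ⟨k', hk', hy'⟩
          rw [hg k' y hy', hL]
          simp only [decide_eq_true_eq]
          exact hkt k' hk'
        rw [insertBy_front _ _ _ h2]
        have h3 : t.flatMap (fun k1 => g k1 ++ if k = k1 then [s] else []) = t.flatMap g := by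
          apply List.flatMap_congr
          intro k1 hk1
          have hne : k ≠ k1 := by have := hkt k1 hk1; omega
          simp [hne]
        rw [h3]
        simp
      · have hmt : L ∈ t := by
          rcases List.mem_cons.mp hmem with h | h
          · exact absurd h.symm hkL
          · exact h
        have hLk : L < k := hkt L hmt
        have h1 : ∀ y ∈ g k, (decide (PySem.Str.len y < PySem.Str.len s)) = false := by
          intro y hy
          rw [hg k y hy, hL]
          simp only [decide_eq_false_iff_not, not_lt]
          omega
        rw [insertBy_append_not _ _ _ _ h1, ih hpt hmt]
        have hne : L ≠ k := by omega
        simp [hne]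

-- CORE, case "len s is a new key": s becomes its own bucket at the right position.
theorem flat_new (s : String) (L : Int) (hL : PySem.Str.len s = L)
    (g : Int → List String) (hg : ∀ k, ∀ x ∈ g k, PySem.Str.len x = k)
    (hgL : g L = []) :
    ∀ ks : List Int, ks.Pairwise (fun a b => b < a) → L ∉ ks →
    PySem.List.insertBy (fun a b => decide (PySem.Str.len b < PySem.Str.len a)) s
        (ks.flatMap g) =
      (PySem.List.insertBy (fun a b : Int => decide (b < a)) L ks).flatMap
        (fun k => g k ++ if L = k then [s] else []) := by
  intro ks
  induction ks with
  | nil => simp [PySem.List.insertBy, hgL]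
  | cons k t ih =>
      intro hpw hnot
      have hpt := hpw.of_cons
      have hkt : ∀ k' ∈ t, k' < k := fun k' hk' => (List.pairwise_cons.mp hpw).1 k' hk'
      have hkL : k ≠ L := by intro h; exact hnot (by simp [h])
      by_cases hlt : k < L
      · have h2 : ∀ y ∈ (k :: t).flatMap g, (decide (PySem.Str.len y < PySem.Str.len s)) = true := by
          intro y hy
          rcases List.mem_flatMap.mp hy with ⟨k', hk', hy'⟩
          have hk'le : k' ≤ k := by
            rcases List.mem_cons.mp hk' with h | h
            · omega
            · exact le_of_lt (hkt k' h)
          rw [hg k' y hy', hL]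
          simp only [decide_eq_true_eq]
          omega
        rw [insertBy_front _ _ _ h2]
        have h4 : PySem.List.insertBy (fun a b : Int => decide (b < a)) L (k :: t) =
            L :: k :: t := by
          apply insertBy_front
          intro y hy
          have hyk : y ≤ k := by
            rcases List.mem_cons.mp hy with h | h
            · omega
            · exact le_of_lt (hkt y h)
          simp only [decide_eq_true_eq]
          omega
        have h3 : (k :: t).flatMap (fun k1 => g k1 ++ if L = k1 then [s] else []) =
            (k :: t).flatMap g := by
          apply List.flatMap_congr
          intro k1 hk1
          have hne : L ≠ k1 := by
            rcases List.mem_cons.mp hk1 with h | h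
            · omega
            · have := hkt k1 h; omega
          simp [hne]
        rw [h4, ← h3]
        simp [hgL]
      · have hgt : L < k := by
          rcases lt_or_gt_of_ne hkL with h | h
          · omega
          · omega
        have h1 : ∀ y ∈ g k, (decide (PySem.Str.len y < PySem.Str.len s)) = false := by
          intro y hy
          rw [hg k y hy, hL]
          simp only [decide_eq_false_iff_not, not_lt]
          omega
        simp only [List.flatMap_cons]
        have hnt : L ∉ t := by intro h; exact hnot (by simp [h])
        rw [insertBy_append_not _ _ _ _ h1, ih hpt hnt]
        have hbef : (decide (k < L)) = false := by
          simp only [decide_eq_false_iff_not, not_lt]; omega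
        simp only [PySem.List.insertBy, hbef]
        have hne : L ≠ k := by omega
        simp [hne]

-- The stable descending-by-length sort IS: distinct lengths in descending order,
-- each expanded to the input-order strings of that length.
theorem key_lemma (xs : List String) :
    PySem.List.sorted xs PySem.Str.len true =
      (PySem.List.sorted (PySem.Set.ofList (xs.map PySem.Str.len)) (fun k => k) true).flatMap
        (fun k => xs.filter (fun s => PySem.Str.len s == k)) := by
  induction xs using List.reverseRecOn with
  | nil => simp [PySem.List.sorted, PySem.Set.ofList]
  | append_singleton xs x ih =>
      have hks : (PySem.Set.ofList ((xs ++ [x]).map PySem.Str.len)) =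
          PySem.Set.add (PySem.Set.ofList (xs.map PySem.Str.len)) (PySem.Str.len x) := by
        rw [List.map_append, PySem.Set.ofList_eq_foldl, List.foldl_append,
          ← PySem.Set.ofList_eq_foldl]
        rfl
      have hfilter : ∀ k : Int, (xs ++ [x]).filter (fun s => PySem.Str.len s == k) =
          xs.filter (fun s => PySem.Str.len s == k) ++
            (if PySem.Str.len x = k then [x] else []) := by
        intro k
        rw [List.filter_append]
        congr 1
        simp [List.filter_singleton]
      have hg : ∀ k, ∀ y ∈ xs.filter (fun s => PySem.Str.len s == k), PySem.Str.len y = k := by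
        intro k y hy
        have := (List.mem_filter.mp hy).2
        exact beq_iff_eq.mp this
      have hpw := sorted_rev_strict (PySem.Set.ofList (xs.map PySem.Str.len))
        (PySem.Set.nodup_ofList _)
      rw [sorted_rev_snoc, ih, hks]
      by_cases hmem : PySem.Str.len x ∈ PySem.Set.ofList (xs.map PySem.Str.len)
      · have hadd : PySem.Set.add (PySem.Set.ofList (xs.map PySem.Str.len)) (PySem.Str.len x) =
            PySem.Set.ofList (xs.map PySem.Str.len) := by
          simp only [PySem.Set.add, PySem.Set.contains]
          rw [if_pos (by simpa only [List.contains_iff_mem] using hmem)]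
        rw [hadd]
        have hmemS : PySem.Str.len x ∈
            PySem.List.sorted (PySem.Set.ofList (xs.map PySem.Str.len)) (fun k => k) true :=
          (PySem.List.sorted_perm _ _ true).mem_iff.mpr hmem
        rw [flat_mem x (PySem.Str.len x) rfl _ hg _ hpw hmemS]
        apply List.flatMap_congr
        intro k _
        rw [hfilter k]
      · have hadd : PySem.Set.add (PySem.Set.ofList (xs.map PySem.Str.len)) (PySem.Str.len x) =
            PySem.Set.ofList (xs.map PySem.Str.len) ++ [PySem.Str.len x] := by
          simp only [PySem.Set.add, PySem.Set.contains]
          rw [if_neg]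
          simp only [List.contains_iff_mem]
          exact hmem
        have hgL : xs.filter (fun s => PySem.Str.len s == PySem.Str.len x) = [] := by
          rw [List.filter_eq_nil_iff]
          intro s hs
          simp only [beq_iff_eq]
          intro h
          exact hmem ((PySem.Set.mem_ofList _ _).mpr (by
            rw [← h]; exact List.mem_map_of_mem hs))
        rw [hadd, sorted_rev_snoc, flat_new x (PySem.Str.len x) rfl _ hg hgL _ hpw
          (fun h => hmem ((PySem.List.sorted_perm _ _ true).mem_iff.mp h))]
        apply List.flatMap_congr
        intro k _
        rw [hfilter k]

-- B's dict: its keys are the distinct lengths, its buckets the input-order filters.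
theorem buckets_keys (xs : List String) :
    (pvBuckets xs).keys = PySem.Set.ofList (xs.map PySem.Str.len) := by
  unfold pvBuckets
  rw [PySem.Dict.keys_foldl_modify_key xs PySem.Str.len [] (fun _ x b => b ++ [x])]
  rw [PySem.Dict.keys_empty, PySem.Set.ofList_eq_foldl]
  rfl

theorem buckets_getD (xs : List String) (k : Int) :
    (pvBuckets xs).getD k [] = xs.filter (fun s => PySem.Str.len s == k) := by
  have hfold : pvBuckets xs =
      (xs.map (fun s => (PySem.Str.len s, s))).foldl
        (fun d p => d.modify p.1 [] (fun b => b ++ [p.2])) PySem.Dict.empty := by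
    unfold pvBuckets
    rw [List.foldl_map]
  rw [hfold, PySem.Dict.getD_foldl_modify_append, List.filter_map, List.map_map]
  simp [Function.comp_def]

theorem B_eq_flat (xs : List String) :
    sortByStringLength_alt xs =
      (PySem.List.sorted (PySem.Set.ofList (xs.map PySem.Str.len)) (fun k => k) true).flatMap
        (fun k => xs.filter (fun s => PySem.Str.len s == k)) := by
  unfold sortByStringLength_alt
  rw [PySem.List.foldl_append_eq_flatMap, buckets_keys]
  simp only [List.nil_append]
  apply List.flatMap_congr
  intro k _
  exact buckets_getD xs k

-- ===== VERDICT (by name: the statement is the Claim_ definition above) =====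
theorem sortByStringLength_spec : Claim_equal_sortByStringLength := by
  intro xs _
  unfold Spec_sortByStringLength
  rw [A_eq_sorted, B_eq_flat, key_lemma]
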